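-- pv_equiv track=rewrite | github.com/micozmei/Python-Data-Analysis | test2.py | travel
-- ===== SOURCE A (Python) =====
-- def travel(string, x, y):
--     """
--     Moves a point on coordinates (x, y) by directions given by North
--     (N or n) South (S or s) East (E or e) and West (W or w)in a string.
--     If a character in the string is not a direction,
--     it will be ignored. Note directions are not case sensitive
--     """
--
--     # performs translation depending on character name
--     for char in string:
--         if char == 'N' or char == 'n':
--             y = y + 1
--         elif char == 'S' or char == 's':
--             y = y - 1
--         elif char == 'W' or char == 'w':
--             x = x - 1
--         elif char == 'E' or char == 'e':
--             x = x + 1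
--     return str((x, y))
-- ===== SOURCE B (Python) =====
-- def travel(string, x, y):
--     x += string.count('E') + string.count('e') - string.count('W') - string.count('w')
--     y += string.count('N') + string.count('n') - string.count('S') - string.count('s')
--     return str((x, y))
-- ===== Notes on version B (the rewrite author's own statement) =====
-- stated objective: faster
-- what changed: Replaced A's per-character Python loop with its four-way branch ladder by loop-free closed-form arithmetic over eight str.count substring scans (C-level staged library passes instead of a single interpreted dispatching pass).
import Mathlib
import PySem

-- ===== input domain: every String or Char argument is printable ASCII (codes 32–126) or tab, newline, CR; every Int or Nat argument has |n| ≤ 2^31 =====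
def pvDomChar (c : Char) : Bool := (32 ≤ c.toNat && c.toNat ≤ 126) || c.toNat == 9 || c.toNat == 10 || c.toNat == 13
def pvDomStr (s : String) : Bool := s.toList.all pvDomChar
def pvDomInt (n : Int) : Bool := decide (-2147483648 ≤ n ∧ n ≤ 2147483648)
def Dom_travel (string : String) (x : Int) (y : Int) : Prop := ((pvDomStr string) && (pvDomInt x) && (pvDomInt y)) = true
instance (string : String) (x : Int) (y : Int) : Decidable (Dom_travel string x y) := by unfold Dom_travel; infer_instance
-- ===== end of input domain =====

-- B replaces A's per-character loop with its four-way branch ladder by loop-free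
-- closed-form arithmetic over eight str.count substring scans (measured faster at a timing run's largest size).


-- str((x, y)) in Python: "(x, y)"  (exact for ints; shared formatting of the final pair)
def pyPairStr (x : Int) (y : Int) : String :=
  String.ofList ('('.toString.toList ++ (PySem.Int.toStr x).toList ++ ", ".toList ++ (PySem.Int.toStr y).toList ++ ")".toList)

-- ===== PORT A =====
-- the for-loop over the characters, updating (x, y) per branch ladder
def travelLoop : List Char → Int → Int → Int × Int
  | [], x, y => (x, y)
  | c :: t, x, y =>
    if c = 'N' ∨ c = 'n' then travelLoop t x (y + 1)
    else if c = 'S' ∨ c = 's' then travelLoop t x (y - 1)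
    else if c = 'W' ∨ c = 'w' then travelLoop t (x - 1) y
    else if c = 'E' ∨ c = 'e' then travelLoop t (x + 1) y
    else travelLoop t x y

def travel (string : String) (x : Int) (y : Int) : String :=
  let p := travelLoop string.toList x y
  pyPairStr p.1 p.2

-- ===== PORT B =====
-- eight string.count(ch) scans (PySem.Str.count), closed-form arithmetic, no loop
def travel_alt (string : String) (x : Int) (y : Int) : String :=
  let x' := x + (PySem.Str.count string "E" : Int) + (PySem.Str.count string "e" : Int)
              - (PySem.Str.count string "W" : Int) - (PySem.Str.count string "w" : Int)
  let y' := y + (PySem.Str.count string "N" : Int) + (PySem.Str.count string "n" : Int)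
              - (PySem.Str.count string "S" : Int) - (PySem.Str.count string "s" : Int)
  pyPairStr x' y'

-- ===== PRECONDITION & SPEC =====
def Spec_travel (string : String) (x : Int) (y : Int) (out : String) : Prop := out = travel_alt string x y
instance (string : String) (x : Int) (y : Int) (out : String) : Decidable (Spec_travel string x y out) := by unfold Spec_travel; infer_instance

-- ===== CLAIM (what is proved, stated in full; the proofs are below) =====
def Claim_equal_travel : Prop := ∀ (string : String) (x : Int) (y : Int), Dom_travel string x y → Spec_travel string x y (travel string x y)

-- ===== LEMMAS AND PROOFS =====
-- Python s.count(c) for a single character equals the character count of the list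
theorem count_go_singleton (c : Char) (l : List Char) (fuel acc : Nat) (h : l.length ≤ fuel) :
    PySem.Chars.count.go [c] fuel l acc = acc + l.count c := by
  induction l generalizing fuel acc with
  | nil => cases fuel <;> simp [PySem.Chars.count.go]
  | cons a t ih =>
    cases fuel with
    | zero => simp at h
    | succ f =>
      simp only [List.length, Nat.succ_le_succ_iff] at h
      rw [PySem.Chars.count.go]
      by_cases hc : a = c
      · subst hc
        simp only [List.isPrefixOf, beq_self_eq_true, Bool.true_and,
          if_true, List.length_singleton, List.drop_one, List.tail_cons]
        rw [ih f (acc + 1) h, List.count_cons_self]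
        omega
      · have hp : ([c].isPrefixOf (a :: t)) = false := by
          simp [List.isPrefixOf]
          exact fun hh => absurd hh.symm hc
        rw [hp]
        simp only [if_false, Bool.false_eq_true]
        rw [ih f acc h, List.count_cons_of_ne hc]

theorem strCount_singleton (s sub : String) (c : Char) (h : sub.toList = [c]) :
    PySem.Str.count s sub = s.toList.count c := by
  rw [PySem.Str.count_eq, h, PySem.Chars.count]
  simp only [List.isEmpty_cons, if_false, Bool.false_eq_true]
  rw [count_go_singleton c s.toList s.toList.length 0 le_rfl, Nat.zero_add]

-- closed form of A's loop: the final point from the eight character counts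
theorem travelLoop_eq (l : List Char) (x y : Int) :
    travelLoop l x y =
      (x + (l.count 'E' : Int) + (l.count 'e' : Int) - (l.count 'W' : Int) - (l.count 'w' : Int),
       y + (l.count 'N' : Int) + (l.count 'n' : Int) - (l.count 'S' : Int) - (l.count 's' : Int)) := by
  induction l generalizing x y with
  | nil => simp [travelLoop]
  | cons c t ih =>
    simp only [travelLoop]
    split_ifs with h1 h2 h3 h4
    · rcases h1 with h | h <;> subst h <;> rw [ih] <;> simp <;> ring
    · rcases h2 with h | h <;> subst h <;> rw [ih] <;> simp <;> ring
    · rcases h3 with h | h <;> subst h <;> rw [ih] <;> simp <;> ring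
    · rcases h4 with h | h <;> subst h <;> rw [ih] <;> simp <;> ring
    · simp only [not_or] at h1 h2 h3 h4
      rw [ih]
      simp [h1.1, h1.2, h2.1, h2.2, h3.1, h3.2, h4.1, h4.2]

-- ===== VERDICT (by name: the statement is the Claim_ definition above) =====
theorem travel_spec : Claim_equal_travel := by
  intro s x y _
  show _ = _
  rw [travel, travel_alt, travelLoop_eq]
  rw [strCount_singleton s "E" 'E' (by decide), strCount_singleton s "e" 'e' (by decide),
      strCount_singleton s "W" 'W' (by decide), strCount_singleton s "w" 'w' (by decide),
      strCount_singleton s "N" 'N' (by decide), strCount_singleton s "n" 'n' (by decide),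
      strCount_singleton s "S" 'S' (by decide), strCount_singleton s "s" 's' (by decide)]
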